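-- pv_equiv track=rewrite | github.com/JonathanReeve/dissertation | 04-colors/deep-imaginer/processModel.py | getMaxCombinedScoreHex
-- ===== SOURCE A (Python) =====
-- def getMaxCombinedScoreHex(word, colorPairs):
--     """
--     Add up all scores, return the hex code with the highest combined score
--     """
--     # First transform into a dictionary {hex: [list of scores]}
--     wordHexes = {}
--     for pair in colorPairs:
--         hexCode, score = pair
--         if hexCode.startswith('#'):
--             hexCode = hexCode[1:]
--         if hexCode in wordHexes:
--             wordHexes[hexCode].append(score)
--         else:
--             wordHexes[hexCode] = [score]
--     scoresSums = {hexCode: sum(scores) for hexCode, scores in wordHexes.items()}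
--     return max(scoresSums, key=scoresSums.get)
-- ===== SOURCE B (Python) =====
-- def getMaxCombinedScoreHex(word, colorPairs):
--     """
--     Return the hex code with the highest combined score.
--     Dict-free brute force: walk the pairs, and at each FIRST occurrence of a
--     normalized hex code rescan the whole list to compute its total, keeping a
--     running best (strict > so the earliest maximal code wins).
--     """
--     seen = []
--     best = None
--     bestTotal = 0
--     for h, _ in colorPairs:
--         k = h[1:] if h.startswith('#') else h
--         if k in seen:
--             continue
--         seen.append(k)
--         total = sum(s for h2, s in colorPairs
--                     if (h2[1:] if h2.startswith('#') else h2) == k)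
--         if best is None or total > bestTotal:
--             best, bestTotal = k, total
--     return best
-- ===== Notes on version B (the rewrite author's own statement) =====
-- stated objective: alternative
-- what changed: B drops A's dict-of-score-lists plus summing pass entirely: it scans the pairs, and at each first occurrence of a normalized hex code rescans the whole list to total that code, keeping a running best (strict > preserves first-appearance tie-breaking).
import Mathlib
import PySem

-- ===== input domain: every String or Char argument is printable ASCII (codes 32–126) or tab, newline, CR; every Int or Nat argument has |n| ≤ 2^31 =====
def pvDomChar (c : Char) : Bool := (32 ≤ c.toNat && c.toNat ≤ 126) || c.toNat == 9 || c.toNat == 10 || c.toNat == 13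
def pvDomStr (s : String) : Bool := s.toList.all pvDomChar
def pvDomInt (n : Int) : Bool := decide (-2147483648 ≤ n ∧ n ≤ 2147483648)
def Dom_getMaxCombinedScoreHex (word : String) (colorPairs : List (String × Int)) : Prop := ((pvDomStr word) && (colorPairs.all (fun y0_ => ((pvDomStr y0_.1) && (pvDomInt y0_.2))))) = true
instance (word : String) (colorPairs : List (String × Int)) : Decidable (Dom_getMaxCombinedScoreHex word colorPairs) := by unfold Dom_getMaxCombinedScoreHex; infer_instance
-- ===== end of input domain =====

-- B replaces A's dict-of-score-lists + summing pass by a dict-free brute-force scan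
-- (rescan the list to total each first-seen normalized code, keep a running best);
-- objective: alternative (no speed claim).

-- the normalization step both Pythons perform on each hex code
def pvNorm (s : String) : String :=
  if PySem.Str.startswith s "#" then PySem.Str.slice s (some 1) none else s

-- ===== PORT A =====
def getMaxCombinedScoreHex (word : String) (colorPairs : List (String × Int)) : String :=
  -- wordHexes: {hex: [list of scores]}
  let wordHexes : PySem.Dict String (List Int) :=
    colorPairs.foldl (fun d pair =>
      let hexCode := pair.1
      let score := pair.2
      let hexCode := pvNorm hexCode
      if d.contains hexCode then
        d.insert hexCode (d.getD hexCode [] ++ [score])   -- wordHexes[hexCode].append(score)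
      else
        d.insert hexCode [score]) PySem.Dict.empty
  -- scoresSums = {hexCode: sum(scores) for hexCode, scores in wordHexes.items()}
  let scoresSums : PySem.Dict String Int :=
    PySem.Dict.mk (wordHexes.items.map (fun kv => (kv.1, kv.2.sum)))
  -- max(scoresSums, key=scoresSums.get); Pre_ excludes the empty dict (ValueError)
  (PySem.List.max? scoresSums.keys (fun k => scoresSums.getD k 0)).getD ""

-- ===== PORT B =====
def getMaxCombinedScoreHex_alt (word : String) (colorPairs : List (String × Int)) : String :=
  -- state: (seen, best) with best = none ↔ Python's best is None, else some (best, bestTotal)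
  let st :=
    colorPairs.foldl (fun st (pair : String × Int) =>
      let k := pvNorm pair.1
      if st.1.contains k then st                 -- if k in seen: continue
      else
        -- seen.append(k); total = sum(s for h2, s in colorPairs if norm(h2) == k)
        let total := colorPairs.foldl (fun t q => if pvNorm q.1 == k then t + q.2 else t) 0
        let best' :=
          match st.2 with                        -- if best is None or total > bestTotal
          | none => some (k, total)
          | some (b, bt) => if bt < total then some (k, total) else some (b, bt)
        (st.1 ++ [k], best'))
      (([] : List String), (none : Option (String × Int)))
  -- return best; Pre_ excludes the empty input, where Python's best stays None
  (st.2.getD ("", 0)).1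

-- ===== PRECONDITION & SPEC =====
-- Pre_ excludes only empty colorPairs, on which Python A (max of an empty dict) raises ValueError.
def Pre_getMaxCombinedScoreHex (word : String) (colorPairs : List (String × Int)) : Prop := colorPairs ≠ []
instance (word : String) (colorPairs : List (String × Int)) : Decidable (Pre_getMaxCombinedScoreHex word colorPairs) := by unfold Pre_getMaxCombinedScoreHex; infer_instance

def pvWitness_getMaxCombinedScoreHex : String × (List (String × Int)) := ("red", [("#ff0000", 2), ("ff0000", 3), ("00ff00", 4)])

def Spec_getMaxCombinedScoreHex (word : String) (colorPairs : List (String × Int)) (out : String) : Prop := out = getMaxCombinedScoreHex_alt word colorPairs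
instance (word : String) (colorPairs : List (String × Int)) (out : String) : Decidable (Spec_getMaxCombinedScoreHex word colorPairs out) := by unfold Spec_getMaxCombinedScoreHex; infer_instance

-- ===== CLAIM (what is proved, stated in full; the proofs are below) =====
def Claim_equal_getMaxCombinedScoreHex : Prop := ∀ (word : String) (colorPairs : List (String × Int)), Dom_getMaxCombinedScoreHex word colorPairs → Pre_getMaxCombinedScoreHex word colorPairs → Spec_getMaxCombinedScoreHex word colorPairs (getMaxCombinedScoreHex word colorPairs)

-- ===== LEMMAS AND PROOFS =====

-- the per-key summing map
def pvSum1 (kv : String × List Int) : String × Int := (kv.1, kv.2.sum)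

lemma get?_mk_map_sum (L : List (String × List Int)) (k : String) :
    (PySem.Dict.mk (L.map pvSum1)).get? k = ((PySem.Dict.mk L).get? k).map List.sum := by
  induction L with
  | nil => rfl
  | cons a L ih =>
    obtain ⟨k1, v1⟩ := a
    simp only [List.map_cons, pvSum1, PySem.Dict.get?_mk_cons]
    by_cases h : k1 == k <;> simp [h, ih]

lemma getD_mk_map_sum (L : List (String × List Int)) (k : String) :
    (PySem.Dict.mk (L.map pvSum1)).getD k 0 = ((PySem.Dict.mk L).getD k []).sum := by
  rw [PySem.Dict.getD_eq_get?_getD, PySem.Dict.getD_eq_get?_getD, get?_mk_map_sum]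
  cases (PySem.Dict.mk L).get? k <;> simp

lemma contains_mk_map_sum (L : List (String × List Int)) (k : String) :
    (PySem.Dict.mk (L.map pvSum1)).contains k = (PySem.Dict.mk L).contains k := by
  rw [PySem.Dict.contains_eq_isSome_get?, PySem.Dict.contains_eq_isSome_get?, get?_mk_map_sum]
  cases (PySem.Dict.mk L).get? k <;> rfl

-- A's grouping fold and a running-total fold stay related by mapping pvSum1 over the items
lemma build_rel : ∀ (l : List (String × Int)) (d : PySem.Dict String (List Int)),
    l.foldl (fun d pair =>
        let h := pvNorm pair.1
        d.insert h (d.getD h 0 + pair.2)) (PySem.Dict.mk (d.items.map pvSum1))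
      = PySem.Dict.mk ((l.foldl (fun d pair =>
          let hexCode := pvNorm pair.1
          if d.contains hexCode then
            d.insert hexCode (d.getD hexCode [] ++ [pair.2])
          else
            d.insert hexCode [pair.2]) d).items.map pvSum1) := by
  intro l
  induction l with
  | nil => intro d; rfl
  | cons p l ih =>
    intro d
    simp only [List.foldl_cons]
    set h := pvNorm p.1 with hh
    by_cases hc : d.contains h = true
    · have hc2 : (PySem.Dict.mk (d.items.map pvSum1)).contains h = true := by
        rw [contains_mk_map_sum]; exact hc
      have hgd : (PySem.Dict.mk (d.items.map pvSum1)).getD h 0 = (d.getD h []).sum := by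
        rw [getD_mk_map_sum]
      have h1 := PySem.Dict.items_insert_of_contains
        (d := PySem.Dict.mk (d.items.map pvSum1)) (k := h)
        (v := (PySem.Dict.mk (d.items.map pvSum1)).getD h 0 + p.2) hc2
      have h2 := PySem.Dict.items_insert_of_contains (d := d) (k := h)
        (v := d.getD h [] ++ [p.2]) hc
      have Leq : ((PySem.Dict.mk (d.items.map pvSum1)).insert h
            ((PySem.Dict.mk (d.items.map pvSum1)).getD h 0 + p.2)).items
          = ((d.insert h (d.getD h [] ++ [p.2])).items).map pvSum1 := by
        rw [h1, h2, hgd, List.map_map, List.map_map]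
        apply List.map_congr_left
        intro q _
        obtain ⟨qk, qv⟩ := q
        by_cases hq : qk = h
        · subst hq; simp [pvSum1, List.sum_append]
        · simp [pvSum1, hq]
      have hstepB : (PySem.Dict.mk (d.items.map pvSum1)).insert h
            ((PySem.Dict.mk (d.items.map pvSum1)).getD h 0 + p.2)
          = PySem.Dict.mk (((d.insert h (d.getD h [] ++ [p.2])).items).map pvSum1) :=
        congrArg PySem.Dict.mk Leq
      simp only [hc, if_true]
      rw [hstepB, ih]
    · have hcf : d.contains h = false := by simpa using hc
      have hc2 : (PySem.Dict.mk (d.items.map pvSum1)).contains h = false := by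
        rw [contains_mk_map_sum]; exact hcf
      have hgd : (PySem.Dict.mk (d.items.map pvSum1)).getD h 0 = 0 := by
        rw [getD_mk_map_sum, PySem.Dict.getD_of_not_contains _ _ hcf]
        rfl
      have h1 := PySem.Dict.items_insert_of_not_contains
        (d := PySem.Dict.mk (d.items.map pvSum1)) (k := h)
        (v := (PySem.Dict.mk (d.items.map pvSum1)).getD h 0 + p.2) hc2
      have h2 := PySem.Dict.items_insert_of_not_contains (d := d) (k := h)
        (v := [p.2]) hcf
      have Leq : ((PySem.Dict.mk (d.items.map pvSum1)).insert h
            ((PySem.Dict.mk (d.items.map pvSum1)).getD h 0 + p.2)).items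
          = ((d.insert h [p.2]).items).map pvSum1 := by
        rw [h1, h2, hgd, List.map_append]
        simp [pvSum1]
      have hstepB : (PySem.Dict.mk (d.items.map pvSum1)).insert h
            ((PySem.Dict.mk (d.items.map pvSum1)).getD h 0 + p.2)
          = PySem.Dict.mk (((d.insert h [p.2]).items).map pvSum1) :=
        congrArg PySem.Dict.mk Leq
      simp only [hcf, Bool.false_eq_true, if_false]
      rw [hstepB, ih]

-- the running-max step of Python's max(...)
def pvMaxStep {α κ : Type} [LT κ] [DecidableLT κ] (key : α → κ) (acc : Option α) (x : α) : Option α :=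
  match acc with
  | none => some x
  | some m => if key m < key x then some x else some m

lemma max?_eq_foldl_step {α κ : Type} [LT κ] [DecidableLT κ] (xs : List α) (key : α → κ) :
    PySem.List.max? xs key = xs.foldl (pvMaxStep key) none := by
  rw [PySem.List.max?.eq_1]
  congr 1

-- first arg-max over keys (looked up with g) = first of the max? over the items, given
-- the lookup agrees with the stored value on every item
lemma max?_keys_eq_items (L : List (String × Int)) (g : String → Int)
    (hg : ∀ p ∈ L, g p.1 = p.2) :
    PySem.List.max? (L.map Prod.fst) g
      = (PySem.List.max? L (fun kv => kv.2)).map Prod.fst := by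
  rw [max?_eq_foldl_step, max?_eq_foldl_step]
  suffices h : ∀ (L : List (String × Int)) (acc : Option (String × Int)),
      (∀ p ∈ L, g p.1 = p.2) → (∀ p, acc = some p → g p.1 = p.2) →
      (L.map Prod.fst).foldl (pvMaxStep g) (acc.map Prod.fst)
        = ((L.foldl (pvMaxStep (fun kv : String × Int => kv.2)) acc).map Prod.fst) by
    simpa using h L none hg (fun p hp => by cases hp)
  intro L
  induction L with
  | nil => intro acc _ _; rfl
  | cons p L ih =>
    intro acc hL hacc
    simp only [List.map_cons, List.foldl_cons]
    cases acc with
    | none =>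
      exact ih (some p) (fun q hq => hL q (List.mem_cons_of_mem _ hq))
        (by rintro q hq; cases hq; exact hL p List.mem_cons_self)
    | some m =>
      have hm : g m.1 = m.2 := hacc m rfl
      have hp : g p.1 = p.2 := hL p List.mem_cons_self
      have hstep1 : pvMaxStep g (some m.1) p.1 = if g m.1 < g p.1 then some p.1 else some m.1 := rfl
      have hstep2 : pvMaxStep (fun kv : String × Int => kv.2) (some m) p
          = if m.2 < p.2 then some p else some m := rfl
      simp only [Option.map_some]
      rw [hstep1, hstep2, hm, hp]
      by_cases hlt : m.2 < p.2
      · simp only [hlt, if_true]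
        exact ih (some p) (fun q hq => hL q (List.mem_cons_of_mem _ hq))
          (by rintro q hq; cases hq; exact hp)
      · simp only [hlt, if_false]
        exact ih (some m) (fun q hq => hL q (List.mem_cons_of_mem _ hq))
          (by rintro q hq; cases hq; exact hm)

-- A's grouping fold keeps its keys unique
lemma nodup_keys_wordHexes (colorPairs : List (String × Int)) :
    (colorPairs.foldl (fun d pair =>
      let hexCode := pvNorm pair.1
      if d.contains hexCode then
        d.insert hexCode (d.getD hexCode [] ++ [pair.2])
      else
        d.insert hexCode [pair.2]) (PySem.Dict.empty : PySem.Dict String (List Int))).keys.Nodup := by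
  have hfe : (fun (d : PySem.Dict String (List Int)) (pair : String × Int) =>
      let hexCode := pvNorm pair.1
      if d.contains hexCode then
        d.insert hexCode (d.getD hexCode [] ++ [pair.2])
      else
        d.insert hexCode [pair.2])
      = (fun d pair => d.insert (pvNorm pair.1)
          (if d.contains (pvNorm pair.1)
           then d.getD (pvNorm pair.1) [] ++ [pair.2] else [pair.2])) := by
    funext d pair
    by_cases hc : d.contains (pvNorm pair.1) <;> simp [hc]
  rw [hfe]
  exact PySem.Dict.nodup_keys_foldl_insert_key _ _ _ _ (by simp)

-- the distinct keys of ks that are not in seen, in first-appearance order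
def pvNewKeys (seen : List String) : List String → List String
  | [] => []
  | k :: ks => if seen.contains k then pvNewKeys seen ks else k :: pvNewKeys (seen ++ [k]) ks

-- the total score of normalized code k over the whole list (B's inner rescan)
def pvTot (cp : List (String × Int)) (k : String) : Int :=
  cp.foldl (fun t q => if pvNorm q.1 == k then t + q.2 else t) 0

lemma mem_pvNewKeys : ∀ (ks seen : List String) (x : String),
    x ∈ pvNewKeys seen ks ↔ x ∈ ks ∧ x ∉ seen := by
  intro ks
  induction ks with
  | nil => intro seen x; simp [pvNewKeys]
  | cons a ks ih =>
    intro seen x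
    by_cases hc : seen.contains a = true
    · have ha : a ∈ seen := by simpa using hc
      simp only [pvNewKeys, if_pos hc, ih, List.mem_cons]
      constructor
      · rintro ⟨h1, h2⟩; exact ⟨Or.inr h1, h2⟩
      · rintro ⟨h1 | h1, h2⟩
        · subst h1; exact absurd ha h2
        · exact ⟨h1, h2⟩
    · have ha : a ∉ seen := by simpa using hc
      simp only [pvNewKeys, if_neg hc, List.mem_cons, ih, List.mem_append,
        List.mem_singleton]
      constructor
      · rintro (h1 | ⟨h1, h2⟩)
        · subst h1; exact ⟨Or.inl rfl, ha⟩
        · exact ⟨Or.inr h1, fun hx => h2 (Or.inl hx)⟩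
      · rintro ⟨h1 | h1, h2⟩
        · exact Or.inl h1
        · by_cases hxa : x = a
          · exact Or.inl hxa
          · exact Or.inr ⟨h1, by simp [h2, hxa]⟩

lemma nodup_append_pvNewKeys : ∀ (ks seen : List String), seen.Nodup →
    (seen ++ pvNewKeys seen ks).Nodup := by
  intro ks
  induction ks with
  | nil => intro seen h; simpa [pvNewKeys] using h
  | cons a ks ih =>
    intro seen h
    by_cases hc : seen.contains a = true
    · simp only [pvNewKeys, if_pos hc]
      exact ih seen h
    · have ha : a ∉ seen := by simpa using hc
      simp only [pvNewKeys, if_neg hc]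
      have hsa : (seen ++ [a]).Nodup := by
        simp only [List.nodup_append, h, List.nodup_singleton, true_and]
        intro b hb c hc
        rw [List.mem_singleton] at hc
        subst hc
        exact fun hba => ha (hba ▸ hb)
      have h2 := ih (seen ++ [a]) hsa
      simpa [List.append_assoc] using h2

lemma nodup_pvNewKeys (ks : List String) : (pvNewKeys [] ks).Nodup := by
  simpa using nodup_append_pvNewKeys ks [] List.nodup_nil

lemma pvNewKeys_append_singleton : ∀ (ks seen : List String) (k : String),
    pvNewKeys seen (ks ++ [k])
      = pvNewKeys seen ks ++ (if seen.contains k || ks.contains k then [] else [k]) := by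
  intro ks
  induction ks with
  | nil => intro seen k; by_cases hc : seen.contains k = true <;> simp [pvNewKeys, hc]
  | cons a ks ih =>
    intro seen k
    by_cases hc : seen.contains a = true
    · have ha : a ∈ seen := by simpa using hc
      simp only [List.cons_append, pvNewKeys, if_pos hc, ih seen k]
      have hiff : (seen.contains k || ks.contains k)
          = (seen.contains k || (a :: ks).contains k) := by
        cases h1 : (k == a) <;> cases h2 : seen.contains k <;>
          simp_all [List.contains_cons]
      rw [hiff]
    · simp only [List.cons_append, pvNewKeys, if_neg hc, ih (seen ++ [a]) k]
      have hiff : ((seen ++ [a]).contains k || ks.contains k)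
          = (seen.contains k || (a :: ks).contains k) := by
        cases h1 : (k == a) <;> cases h2 : seen.contains k <;>
          simp_all [List.contains_cons, List.contains_append]
      rw [hiff]

lemma pvTot_append (l : List (String × Int)) (p : String × Int) (k : String) :
    pvTot (l ++ [p]) k = if pvNorm p.1 == k then pvTot l k + p.2 else pvTot l k := by
  simp only [pvTot, List.foldl_append, List.foldl_cons, List.foldl_nil]

lemma pvTot_zero : ∀ (l : List (String × Int)) (k : String),
    (l.map (fun p => pvNorm p.1)).contains k = false → pvTot l k = 0 := by
  intro l
  induction l using List.reverseRecOn with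
  | nil => intro k _; rfl
  | append_singleton l p ih =>
    intro k hk
    simp only [List.map_append, List.contains_append, Bool.or_eq_false_iff] at hk
    rw [pvTot_append]
    have h2' : ¬ k = pvNorm p.1 := by simpa using hk.2
    have h1 : (pvNorm p.1 == k) = false := beq_eq_false_iff_ne.mpr (fun h => h2' h.symm)
    rw [h1]
    simp only [Bool.false_eq_true, if_false]
    exact ih k hk.1

-- characterisation of the running-total dict: its items are the normalized keys in
-- first-appearance order, each paired with its total so far
lemma items_sumfold : ∀ (l : List (String × Int)),
    (l.foldl (fun d pair =>
        let h := pvNorm pair.1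
        d.insert h (d.getD h 0 + pair.2)) (PySem.Dict.empty : PySem.Dict String Int)).items
      = (pvNewKeys [] (l.map (fun p => pvNorm p.1))).map (fun k => (k, pvTot l k)) := by
  intro l
  induction l using List.reverseRecOn with
  | nil => rfl
  | append_singleton l p ih =>
    set k := pvNorm p.1 with hk
    set d := l.foldl (fun d pair =>
        let h := pvNorm pair.1
        d.insert h (d.getD h 0 + pair.2)) (PySem.Dict.empty : PySem.Dict String Int) with hd
    have hfold : ((l ++ [p]).foldl (fun d pair =>
        let h := pvNorm pair.1
        d.insert h (d.getD h 0 + pair.2)) (PySem.Dict.empty : PySem.Dict String Int))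
        = d.insert k (d.getD k 0 + p.2) := by
      rw [List.foldl_append, ← hd]; rfl
    have hkeys : d.keys = pvNewKeys [] (l.map (fun p => pvNorm p.1)) := by
      show d.items.map (·.1) = _
      rw [ih, List.map_map]
      have hid : ((fun x : String × Int => x.1) ∘ fun k => (k, pvTot l k)) = id := rfl
      rw [hid, List.map_id]
    have hnodupk : d.keys.Nodup := by
      rw [hkeys]; exact nodup_pvNewKeys _
    have hnewk := pvNewKeys_append_singleton (l.map (fun p => pvNorm p.1)) [] k
    by_cases hmem : (l.map (fun p => pvNorm p.1)).contains k = true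
    · -- k already present: in-place update
      have hmemK : k ∈ pvNewKeys [] (l.map (fun p => pvNorm p.1)) := by
        rw [mem_pvNewKeys]; exact ⟨by simpa using hmem, by simp⟩
      have hitem : (k, pvTot l k) ∈ d.items := by
        rw [ih]; exact List.mem_map_of_mem hmemK
      have hcont : d.contains k = true := by
        rw [PySem.Dict.contains_eq_decide_mem_keys, hkeys]
        simpa using hmemK
      have hgd : d.getD k 0 = pvTot l k :=
        PySem.Dict.getD_of_mem_items d hitem hnodupk 0
      rw [hfold, PySem.Dict.items_insert_of_contains (d := d) (k := k)
        (v := d.getD k 0 + p.2) hcont, ih, List.map_map]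
      simp only [List.map_append, List.map_cons, List.map_nil, ← hk]
      rw [hnewk, hmem]
      simp only [List.contains_nil, Bool.false_or, if_true, List.append_nil]
      apply List.map_congr_left
      intro k' hk'
      by_cases hkk : k' = k
      · subst hkk
        simp only [Function.comp, beq_self_eq_true, if_true]
        rw [hgd, pvTot_append, hk]
        simp
      · have hne : (k' == k) = false := by simpa using hkk
        simp only [Function.comp, hne, Bool.false_eq_true, if_false]
        rw [pvTot_append]
        have : (pvNorm p.1 == k') = false := by
          rw [← hk]; simpa using fun h => hkk h.symm
        rw [this]
        simp
    · -- k new: appended at the end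
      have hmemf : (l.map (fun p => pvNorm p.1)).contains k = false := by
        simpa using hmem
      have hnm : k ∉ l.map (fun p => pvNorm p.1) := by simpa using hmem
      have hcont : d.contains k = false := by
        rw [PySem.Dict.contains_eq_decide_mem_keys, hkeys]
        simp only [decide_eq_false_iff_not, mem_pvNewKeys]
        intro h
        exact hnm h.1
      have hgd : d.getD k 0 = 0 := PySem.Dict.getD_of_not_contains d 0 hcont
      rw [hfold, PySem.Dict.items_insert_of_not_contains (d := d) (k := k)
        (v := d.getD k 0 + p.2) hcont, ih]
      simp only [List.map_append, List.map_cons, List.map_nil, ← hk]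
      rw [hnewk, hmemf]
      simp only [List.contains_nil, Bool.false_or, Bool.false_eq_true, if_false,
        List.map_append, List.map_cons, List.map_nil]
      congr 1
      · apply List.map_congr_left
        intro k' hk'
        rw [pvTot_append]
        have hne : k' ≠ k := by
          intro h; subst h
          exact hnm ((mem_pvNewKeys _ _ k).1 hk').1
        have : (pvNorm p.1 == k') = false := by
          rw [← hk]; simpa using fun h => hne h.symm
        rw [this]; simp
      · rw [pvTot_append, hgd]
        simp only [← hk, beq_self_eq_true, if_true, zero_add]
        rw [pvTot_zero l k hmemf]
        simp
  
-- B's fold computes the running max over the first-occurrence (key, total) list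
lemma bfold_rel (cp : List (String × Int)) : ∀ (l : List (String × Int))
    (seen : List String) (acc : Option (String × Int)),
    (l.foldl (fun st (pair : String × Int) =>
      let k := pvNorm pair.1
      if st.1.contains k then st
      else
        let total := cp.foldl (fun t q => if pvNorm q.1 == k then t + q.2 else t) 0
        let best' :=
          match st.2 with
          | none => some (k, total)
          | some (b, bt) => if bt < total then some (k, total) else some (b, bt)
        (st.1 ++ [k], best')) (seen, acc)).2
      = ((pvNewKeys seen (l.map (fun p => pvNorm p.1))).map
          (fun k => (k, pvTot cp k))).foldl (pvMaxStep (fun kv => kv.2)) acc := by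
  intro l
  induction l with
  | nil => intro seen acc; rfl
  | cons p l ih =>
    intro seen acc
    simp only [List.foldl_cons, List.map_cons, pvNewKeys]
    by_cases hc : seen.contains (pvNorm p.1) = true
    · simp only [hc, if_true]
      exact ih seen acc
    · simp only [hc, Bool.false_eq_true, if_false, List.map_cons, List.foldl_cons]
      rw [ih (seen ++ [pvNorm p.1])]
      congr 1
      show _ = pvMaxStep (fun kv : String × Int => kv.2) acc (pvNorm p.1, pvTot cp (pvNorm p.1))
      cases acc with
      | none => rfl
      | some m => obtain ⟨b, bt⟩ := m; rfl

-- ===== VERDICT (by name: the statement is the Claim_ definition above) =====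
theorem getMaxCombinedScoreHex_spec : Claim_equal_getMaxCombinedScoreHex := by
  intro word colorPairs _ _
  unfold Spec_getMaxCombinedScoreHex getMaxCombinedScoreHex getMaxCombinedScoreHex_alt
  simp only []
  -- A side: reduce the dict-of-lists build to the running-total build
  have hbuild := build_rel colorPairs PySem.Dict.empty
  have hstart : (PySem.Dict.mk ((PySem.Dict.empty : PySem.Dict String (List Int)).items.map pvSum1))
      = (PySem.Dict.empty : PySem.Dict String Int) := rfl
  rw [hstart] at hbuild
  set wordHexes := colorPairs.foldl (fun d pair =>
      let hexCode := pvNorm pair.1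
      if d.contains hexCode then
        d.insert hexCode (d.getD hexCode [] ++ [pair.2])
      else
        d.insert hexCode [pair.2]) (PySem.Dict.empty : PySem.Dict String (List Int)) with hwh
  set scoresSums : PySem.Dict String Int := PySem.Dict.mk (wordHexes.items.map pvSum1) with hss
  have hnodup : scoresSums.keys.Nodup := by
    rw [hss, PySem.Dict.keys_mk]
    have : (wordHexes.items.map pvSum1).map Prod.fst = wordHexes.items.map Prod.fst := by
      rw [List.map_map]; rfl
    rw [show (fun (x : String × Int) => x.1) = Prod.fst from rfl, this]
    have := nodup_keys_wordHexes colorPairs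
    rw [← hwh] at this
    have hk : wordHexes.keys = wordHexes.items.map Prod.fst := PySem.Dict.keys_mk wordHexes.items
    rw [hk] at this
    exact this
  have hg : ∀ p ∈ scoresSums.items, scoresSums.getD p.1 0 = p.2 := by
    intro p hp
    exact PySem.Dict.getD_of_mem_items scoresSums (by exact hp) hnodup 0
  have hkeys : scoresSums.keys = scoresSums.items.map Prod.fst := PySem.Dict.keys_mk scoresSums.items
  have hmax := max?_keys_eq_items scoresSums.items (fun k => scoresSums.getD k 0) hg
  -- B side: its fold is the running max over the first-occurrence (key, total) list,
  -- which is exactly scoresSums.items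
  have hitems : scoresSums.items
      = (pvNewKeys [] (colorPairs.map (fun p => pvNorm p.1))).map
          (fun k => (k, pvTot colorPairs k)) := by
    rw [← hbuild]
    exact items_sumfold colorPairs
  have hB := bfold_rel colorPairs colorPairs [] none
  show (PySem.List.max? scoresSums.keys (fun k => scoresSums.getD k 0)).getD ""
      = (((colorPairs.foldl (fun st (pair : String × Int) =>
      let k := pvNorm pair.1
      if st.1.contains k then st
      else
        let total := colorPairs.foldl (fun t q => if pvNorm q.1 == k then t + q.2 else t) 0
        let best' :=
          match st.2 with
          | none => some (k, total)
          | some (b, bt) => if bt < total then some (k, total) else some (b, bt)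
        (st.1 ++ [k], best'))
      (([] : List String), (none : Option (String × Int)))).2).getD ("", 0)).1
  rw [hB, ← hitems, hkeys, hmax, ← max?_eq_foldl_step]
  cases PySem.List.max? scoresSums.items (fun kv => kv.2) <;> rfl
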